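-- pv_equiv track=rewrite | github.com/abhishekir/CodingBat_Solutions | src/String_2.py | zipZap
-- ===== SOURCE A (Python) =====
-- def zipZap(str):
--     res = ""
--     if len(str) < 3:
--         return str
--     else:
--         i = 0
--         while i <= len(str)-3:
--             if str[i] == "z" and str[i+2] == "p":
--                 res += "zp"
--                 i += 3
--             else:
--                 res += str[i]
--                 i += 1
--         res += str[i:]
--         return res
-- ===== SOURCE B (Python) =====
-- def zipZap(str):
--     out = []
--     t = str
--     while t:
--         if len(t) >= 3 and t[0] == "z" and t[2] == "p":
--             out.append("zp")
--             t = t[3:]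
--         else:
--             out.append(t[0])
--             t = t[1:]
--     return "".join(out)
-- ===== Notes on version B (the rewrite author's own statement) =====
-- stated objective: simpler
-- what changed: Replaced A's index-based while loop with length guard, accumulator string and final tail slice by a loop that repeatedly consumes the remaining suffix of the string (matching the z_p head pattern or stripping one char), collecting output chunks and joining them at the end.
import Mathlib
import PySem

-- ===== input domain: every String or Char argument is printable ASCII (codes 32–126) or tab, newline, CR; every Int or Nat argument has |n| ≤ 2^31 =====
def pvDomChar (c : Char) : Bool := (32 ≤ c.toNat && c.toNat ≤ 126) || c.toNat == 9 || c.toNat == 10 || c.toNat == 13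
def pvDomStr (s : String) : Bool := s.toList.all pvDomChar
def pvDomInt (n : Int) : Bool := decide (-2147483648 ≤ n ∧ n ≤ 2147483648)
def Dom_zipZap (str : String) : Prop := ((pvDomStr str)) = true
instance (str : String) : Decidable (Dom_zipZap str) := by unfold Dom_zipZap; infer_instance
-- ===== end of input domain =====

-- B replaces A's index-based while loop (with its <3 guard and final tail slice) by a loop that
-- consumes the remaining suffix of the string, collecting output chunks and joining them (objective: simpler).

-- ===== PORT A =====
def zipZapLoopA (cs : List Char) (i : Nat) (res : List Char) : List Char :=
  if i + 3 ≤ cs.length then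
    if cs.getD i ' ' = 'z' ∧ cs.getD (i+2) ' ' = 'p' then
      zipZapLoopA cs (i+3) (res ++ ['z','p'])
    else
      zipZapLoopA cs (i+1) (res ++ [cs.getD i ' '])
  else res ++ cs.drop i
termination_by cs.length - i
decreasing_by all_goals omega

def zipZap (str : String) : String :=
  if str.toList.length < 3 then str
  else String.ofList (zipZapLoopA str.toList 0 [])

-- ===== PORT B =====
def zipZapLoopB (t : List Char) (out : List (List Char)) : List (List Char) :=
  if t = [] then out
  else if 3 ≤ t.length ∧ t.headD ' ' = 'z' ∧ t.getD 2 ' ' = 'p' then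
    zipZapLoopB (t.drop 3) (out ++ [['z', 'p']])
  else
    zipZapLoopB (t.drop 1) (out ++ [[t.headD ' ']])
termination_by t.length
decreasing_by
  all_goals
    (rename_i h _
     cases t with
     | nil => exact absurd rfl h
     | cons a r => simp only [List.length_drop, List.length_cons]; omega)

def zipZap_alt (str : String) : String :=
  String.ofList (zipZapLoopB str.toList []).flatten

-- ===== PRECONDITION & SPEC =====
def Spec_zipZap (str : String) (out : String) : Prop := out = zipZap_alt str
instance (str : String) (out : String) : Decidable (Spec_zipZap str out) := by unfold Spec_zipZap; infer_instance

-- ===== CLAIM (what is proved, stated in full; the proofs are below) =====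
def Claim_equal_zipZap : Prop := ∀ (str : String), Dom_zipZap str → Spec_zipZap str (zipZap str)

-- ===== LEMMAS AND PROOFS =====

-- proof-side characterisation of the zip-zap rewrite, shared by both loop lemmas
def zipZapRecB : List Char → List Char
  | a :: b :: c :: rest =>
    if a = 'z' ∧ c = 'p' then 'z' :: 'p' :: zipZapRecB rest
    else a :: zipZapRecB (b :: c :: rest)
  | a :: rest => a :: zipZapRecB rest
  | [] => []
termination_by cs => cs.length

theorem recB_short (cs : List Char) (h : cs.length < 3) : zipZapRecB cs = cs := by
  match cs with
  | [] => simp [zipZapRecB]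
  | [a] => simp [zipZapRecB]
  | [a, b] => simp [zipZapRecB]
  | a :: b :: c :: r => simp at h; omega

theorem loopA_eq (cs : List Char) (i : Nat) (res : List Char) :
    zipZapLoopA cs i res = res ++ zipZapRecB (cs.drop i) := by
  induction i, res using zipZapLoopA.induct cs with
  | case1 i res h hc ih =>
    rw [zipZapLoopA]
    simp only [if_pos h, if_pos hc, ih]
    have h0 : i < cs.length := by omega
    have h1 : i + 1 < cs.length := by omega
    have h2 : i + 2 < cs.length := by omega
    rw [List.drop_eq_getElem_cons h0, List.drop_eq_getElem_cons h1, List.drop_eq_getElem_cons h2]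
    obtain ⟨hz, hp⟩ := hc
    rw [List.getD_eq_getElem _ _ h0] at hz
    rw [List.getD_eq_getElem _ _ h2] at hp
    simp [zipZapRecB, hz, hp]
  | case2 i res h hc ih =>
    rw [zipZapLoopA]
    simp only [if_pos h, if_neg hc, ih]
    have h0 : i < cs.length := by omega
    have h1 : i + 1 < cs.length := by omega
    have h2 : i + 2 < cs.length := by omega
    rw [List.drop_eq_getElem_cons h0, List.drop_eq_getElem_cons h1, List.drop_eq_getElem_cons h2]
    rw [List.getD_eq_getElem _ _ h0]
    rw [zipZapRecB]
    have hc' : ¬ (cs[i] = 'z' ∧ cs[i+2] = 'p') := by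
      intro ⟨hz, hp⟩
      exact hc ⟨by rw [List.getD_eq_getElem _ _ h0]; exact hz,
                by rw [List.getD_eq_getElem _ _ h2]; exact hp⟩
    rw [if_neg hc']
    simp
  | case3 i res h =>
    rw [zipZapLoopA, if_neg h]
    have : cs.drop i = zipZapRecB (cs.drop i) := by
      have hl : (cs.drop i).length < 3 := by simp; omega
      match hd : cs.drop i with
      | [] => simp [zipZapRecB]
      | [a] => simp [zipZapRecB]
      | [a, b] => simp [zipZapRecB]
      | a :: b :: c :: r => rw [hd] at hl; simp at hl; omega
    rw [← this]

theorem loopB_eq (t : List Char) (out : List (List Char)) :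
    (zipZapLoopB t out).flatten = out.flatten ++ zipZapRecB t := by
  induction t, out using zipZapLoopB.induct with
  | case1 out => simp [zipZapLoopB, zipZapRecB]
  | case2 t out ht hc ih =>
    rw [zipZapLoopB, if_neg ht, if_pos hc, ih]
    obtain ⟨hl, hz, hp⟩ := hc
    match t, hl with
    | a :: b :: c :: r, _ =>
      simp only [List.headD_cons] at hz
      simp only [List.getD_cons_succ, List.getD_cons_zero] at hp
      simp [zipZapRecB, hz, hp]
  | case3 t out ht hc ih =>
    rw [zipZapLoopB, if_neg ht, if_neg hc, ih]
    match t, ht with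
    | a :: r, _ =>
      rcases r with _ | ⟨b, r⟩
      · simp [zipZapRecB]
      rcases r with _ | ⟨c, r⟩
      · simp [zipZapRecB]
      have hc' : ¬ (a = 'z' ∧ c = 'p') := by
        intro ⟨hz, hp⟩
        exact hc ⟨by simp only [List.length_cons]; omega,
                  by simp [hz], by simp [hp]⟩
      simp [zipZapRecB, hc']

-- ===== VERDICT (by name: the statement is the Claim_ definition above) =====
theorem zipZap_spec : Claim_equal_zipZap := by
  intro str _
  unfold Spec_zipZap zipZap zipZap_alt
  rw [loopB_eq]
  simp only [List.flatten_nil, List.nil_append]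
  split
  · next h => rw [recB_short _ h]; exact String.ofList_toList.symm
  · rw [loopA_eq]; simp
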